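-- pv_equiv track=rewrite | github.com/sirzzang/coding-practice | Programmers/신고결과받기_92334/python/Solution1.py | solution
-- ===== SOURCE A (Python) =====
-- def solution(id_list, report, k):
--     answer = []
--     report_count = {user_id : 0 for user_id in id_list}
--     report_table = {user_id : [] for user_id in id_list}
--
--     # 중복 제거
--     report_list = list(set(report))
--
--     for r in report_list:
--         reporter, reportee = r.split()
--         report_count[reportee] += 1 # 피신고 횟수
--         report_table[reporter].append(reportee) # 신고자별 신고 명단
--
--     # 신고 처리횟수 집계
--     for user_id in id_list:
--         if not report_table[user_id]:
--             answer.append(0)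
--         else:
--             cnt = 0
--             for reportee_id in report_table[user_id]:
--                 if report_count[reportee_id] >= k:
--                     cnt += 1
--             answer.append(cnt)
--
--     return answer
-- ===== SOURCE B (Python) =====
-- def solution(id_list, report, k):
--     pairs = [tuple(r.split()) for r in set(report)]
--     received = {u: 0 for u in id_list}
--     for _, reportee in pairs:
--         received[reportee] += 1
--     banned = {u for u in id_list if received[u] >= k}
--     result = {u: 0 for u in id_list}
--     for reporter, reportee in pairs:
--         if reportee in banned:
--             result[reporter] += 1
--     return [result[u] for u in id_list]
-- ===== Notes on version B (the rewrite author's own statement) =====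
-- stated objective: simpler
-- what changed: Replaces A's per-user adjacency table (report_table) and nested per-user/per-reportee counting loop with a banned set built from the received-report counts plus one flat counting pass over the deduplicated reports.
-- outside the precondition, e.g. on solution(['a', 'b'], ['a b c'], 1): A raises ValueError, B raises ValueError; on solution(['a'], ['a z'], 1): A raises KeyError, B raises KeyError
import Mathlib
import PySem

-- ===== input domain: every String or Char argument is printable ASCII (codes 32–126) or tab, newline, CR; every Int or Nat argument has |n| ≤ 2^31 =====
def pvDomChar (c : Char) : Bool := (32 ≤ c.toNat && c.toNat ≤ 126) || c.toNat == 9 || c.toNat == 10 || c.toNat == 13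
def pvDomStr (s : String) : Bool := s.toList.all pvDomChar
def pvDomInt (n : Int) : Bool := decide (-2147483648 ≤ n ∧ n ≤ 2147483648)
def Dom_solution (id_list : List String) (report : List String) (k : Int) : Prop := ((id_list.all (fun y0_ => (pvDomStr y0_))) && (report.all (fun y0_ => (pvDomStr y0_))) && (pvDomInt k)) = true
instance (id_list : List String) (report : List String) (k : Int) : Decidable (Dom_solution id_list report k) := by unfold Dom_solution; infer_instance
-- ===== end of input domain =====

-- B replaces A's per-user adjacency table and nested per-user/per-reportee scan by a banned set
-- and one flat counting pass over the deduplicated reports (objective: simpler decomposition).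
-- Both programs consume the deduplicated reports only through order-independent counts, so the
-- hash iteration order of Python's set does not affect the result.

-- ===== PORT A =====
-- 'reporter, reportee = r.split()': Pre_ guarantees exactly two tokens; the ("","") arm is the
-- ValueError case, excluded by Pre_solution.
def pvSplit2 (r : String) : String × String :=
  match PySem.Str.split₀ r with
  | [a, b] => (a, b)
  | _ => ("", "")

def solution (id_list : List String) (report : List String) (k : Int) : List Int :=
  let report_count : PySem.Dict String Int :=
    id_list.foldl (fun d u => d.insert u 0) PySem.Dict.empty
  let report_table : PySem.Dict String (List String) :=
    id_list.foldl (fun d u => d.insert u []) PySem.Dict.empty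
  let report_list : PySem.Set String := PySem.Set.ofList report
  -- one loop over report_list updating both dicts (KeyError on unknown ids is excluded by Pre_)
  let st :=
    report_list.foldl (fun (st : PySem.Dict String Int × PySem.Dict String (List String)) r =>
      let p := pvSplit2 r
      (st.1.modify p.2 0 (fun x => x + 1), st.2.modify p.1 [] (fun l => l ++ [p.2])))
      (report_count, report_table)
  id_list.foldl (fun answer u =>
    let tbl := (st.2).getD u []
    if tbl = [] then answer ++ [0]
    else answer ++ [tbl.foldl (fun cnt t => if (st.1).getD t 0 ≥ k then cnt + 1 else cnt) 0]) []

-- ===== PORT B =====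
def solution_alt (id_list : List String) (report : List String) (k : Int) : List Int :=
  let pairs := (PySem.Set.ofList report).map pvSplit2
  let received : PySem.Dict String Int :=
    pairs.foldl (fun d p => d.modify p.2 0 (fun x => x + 1))
      (id_list.foldl (fun d u => d.insert u 0) PySem.Dict.empty)
  let banned : PySem.Set String :=
    PySem.Set.ofList (id_list.filter (fun u => received.getD u 0 ≥ k))
  let result : PySem.Dict String Int :=
    pairs.foldl (fun d p => if PySem.Set.contains banned p.2 then d.modify p.1 0 (fun x => x + 1) else d)
      (id_list.foldl (fun d u => d.insert u 0) PySem.Dict.empty)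
  id_list.map (fun u => result.getD u 0)

-- ===== PRECONDITION & SPEC =====
-- Pre_ excludes exactly the inputs on which A raises: a report that does not split into exactly
-- two whitespace-separated tokens (ValueError on unpacking) or that names a reporter/reportee
-- outside id_list (KeyError on the dict lookups).
def Pre_solution (id_list : List String) (report : List String) (k : Int) : Prop :=
  ∀ r ∈ report, (PySem.Str.split₀ r).length = 2 ∧ ∀ t ∈ PySem.Str.split₀ r, t ∈ id_list
instance (id_list : List String) (report : List String) (k : Int) : Decidable (Pre_solution id_list report k) := by unfold Pre_solution; infer_instance

def pvWitness_solution : List String × List String × Int := (["muzi", "frodo", "apeach"], ["muzi frodo", "apeach muzi", "muzi frodo"], 1)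

def Spec_solution (id_list : List String) (report : List String) (k : Int) (out : List Int) : Prop := out = solution_alt id_list report k
instance (id_list : List String) (report : List String) (k : Int) (out : List Int) : Decidable (Spec_solution id_list report k out) := by unfold Spec_solution; infer_instance

-- ===== CLAIM (what is proved, stated in full; the proofs are below) =====
def Claim_equal_solution : Prop := ∀ (id_list : List String) (report : List String) (k : Int), Dom_solution id_list report k → Pre_solution id_list report k → Spec_solution id_list report k (solution id_list report k)

-- ===== LEMMAS AND PROOFS =====

-- a fold updating the two components of a pair independently splits into two folds
theorem foldl_prod_indep {α β γ : Type} (l : List α) (f : β → α → β) (g : γ → α → γ)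
    (b : β) (c : γ) :
    l.foldl (fun st x => (f st.1 x, g st.2 x)) (b, c) = (l.foldl f b, l.foldl g c) := by
  induction l generalizing b c with
  | nil => rfl
  | cons x xs ih => simpa using ih (f b x) (g c x)

-- initialising a dict with a constant value leaves every getD-at-that-default equal to it
theorem getD_foldl_insert_const {ν : Type} (ids : List String) (c : ν) (t : String) :
    ∀ d : PySem.Dict String ν, d.getD t c = c →
      (ids.foldl (fun d u => d.insert u c) d).getD t c = c := by
  induction ids with
  | nil => intro d h; simpa using h
  | cons u us ih =>
    intro d h
    simp only [List.foldl_cons]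
    exact ih _ (by rw [PySem.Dict.getD_insert]; split_ifs <;> simp [h])

-- a guarded counting loop keyed by the first component
theorem getD_foldl_cond_count (l : List (String × String)) (c : String × String → Bool)
    (u : String) :
    ∀ d : PySem.Dict String Int,
      (l.foldl (fun d p => if c p then d.modify p.1 0 (fun x => x + 1) else d) d).getD u 0
        = d.getD u 0 + (l.countP (fun p => c p && p.1 == u) : Int) := by
  induction l with
  | nil => intro d; simp
  | cons p ps ih =>
    intro d
    simp only [List.foldl_cons, List.countP_cons]
    by_cases hc : c p
    · rw [if_pos hc, ih]
      rw [PySem.Dict.getD_modify]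
      by_cases hu : u = p.1
      · simp [hu, hc]; ring
      · have : (p.1 == u) = false := by simp [Ne.symm hu]
        simp [hu, hc, this]
    · rw [if_neg hc, ih]
      simp [hc]

-- a counting loop keyed by the second component
theorem getD_foldl_count_snd (l : List (String × String)) (t : String) :
    ∀ d : PySem.Dict String Int,
      (l.foldl (fun d p => d.modify p.2 0 (fun x => x + 1)) d).getD t 0
        = d.getD t 0 + ((l.map (fun p => p.2)).count t : Int) := by
  induction l with
  | nil => intro d; simp
  | cons p ps ih =>
    intro d
    simp only [List.foldl_cons, List.map_cons, List.count_cons]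
    rw [ih, PySem.Dict.getD_modify]
    by_cases ht : t = p.2
    · simp [ht]; ring
    · have : (p.2 == t) = false := by simp [Ne.symm ht]
      simp [ht, this]

-- ===== VERDICT (by name: the statement is the Claim_ definition above) =====
theorem solution_spec : Claim_equal_solution := by
  intro id_list report k _ hpre
  unfold Spec_solution solution solution_alt
  simp only
  rw [foldl_prod_indep (PySem.Set.ofList report)
    (fun (d : PySem.Dict String Int) r => d.modify (pvSplit2 r).2 0 (fun x => x + 1))
    (fun (d : PySem.Dict String (List String)) r => d.modify (pvSplit2 r).1 [] (fun l => l ++ [(pvSplit2 r).2]))]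
  set pairs := (PySem.Set.ofList report).map pvSplit2 with hpairs
  rw [show (PySem.Set.ofList report).foldl
        (fun (d : PySem.Dict String Int) r => d.modify (pvSplit2 r).2 0 (fun x => x + 1))
        (id_list.foldl (fun d u => d.insert u 0) PySem.Dict.empty)
      = pairs.foldl (fun d p => d.modify p.2 0 (fun x => x + 1))
        (id_list.foldl (fun d u => d.insert u 0) PySem.Dict.empty)
    from (List.foldl_map (f := pvSplit2)
      (g := fun (d : PySem.Dict String Int) p => d.modify p.2 0 (fun x => x + 1))).symm]
  rw [show (PySem.Set.ofList report).foldl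
        (fun (d : PySem.Dict String (List String)) r => d.modify (pvSplit2 r).1 [] (fun l => l ++ [(pvSplit2 r).2]))
        (id_list.foldl (fun d u => d.insert u []) PySem.Dict.empty)
      = pairs.foldl (fun d p => d.modify p.1 [] (fun l => l ++ [p.2]))
        (id_list.foldl (fun d u => d.insert u []) PySem.Dict.empty)
    from (List.foldl_map (f := pvSplit2)
      (g := fun (d : PySem.Dict String (List String)) p => d.modify p.1 [] (fun l => l ++ [p.2]))).symm]
  set cntD := pairs.foldl (fun (d : PySem.Dict String Int) p => d.modify p.2 0 (fun x => x + 1))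
    (id_list.foldl (fun d u => d.insert u 0) PySem.Dict.empty) with hcntD
  set tblD := pairs.foldl (fun (d : PySem.Dict String (List String)) p => d.modify p.1 [] (fun l => l ++ [p.2]))
    (id_list.foldl (fun d u => d.insert u []) PySem.Dict.empty) with htblD
  -- received counts: cntD.getD t 0 = number of dedup'd reports against t
  have hcnt : ∀ t, cntD.getD t 0 = ((pairs.map (fun p => p.2)).count t : Int) := by
    intro t
    rw [hcntD, getD_foldl_count_snd, getD_foldl_insert_const id_list 0 t _ (by simp)]
    ring
  -- every reportee occurring in pairs is in id_list
  have hmem : ∀ p ∈ pairs, p.2 ∈ id_list := by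
    intro p hp
    rw [hpairs, List.mem_map] at hp
    obtain ⟨r, hr, hpr⟩ := hp
    have hrrep : r ∈ report := (PySem.Set.mem_ofList _ _).1 hr
    obtain ⟨hlen, hall⟩ := hpre r hrrep
    subst hpr
    unfold pvSplit2
    match h : PySem.Str.split₀ r with
    | [a, b] => exact hall b (by rw [h]; simp)
    | [] => rw [h] at hlen; simp at hlen
    | [a] => rw [h] at hlen; simp at hlen
    | a :: b :: c :: rest => rw [h] at hlen; simp at hlen
  -- A's answer loop appends one value per user: turn it into a map
  have hbody : ∀ (answer : List Int) (u : String),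
      (if tblD.getD u [] = [] then answer ++ [(0 : Int)]
       else answer ++ [(tblD.getD u []).foldl (fun cnt t => if cntD.getD t 0 ≥ k then cnt + 1 else cnt) 0])
      = answer ++ [if tblD.getD u [] = [] then (0 : Int)
         else (tblD.getD u []).foldl (fun cnt t => if cntD.getD t 0 ≥ k then cnt + 1 else cnt) 0] := by
    intro answer u; split_ifs <;> rfl
  simp only [hbody]
  rw [PySem.List.foldl_append_singleton_eq_map, List.nil_append]
  apply List.map_congr_left
  intro u _
  -- A's table entry for u
  rw [htblD, PySem.Dict.getD_foldl_modify_append,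
      getD_foldl_insert_const id_list [] u _ (by simp), List.nil_append]
  set L := (pairs.filter (fun p => p.1 == u)).map (fun p => p.2) with hL
  -- B's result entry for u
  rw [getD_foldl_cond_count, getD_foldl_insert_const id_list 0 u _ (by simp), zero_add]
  -- B's banned-set test equals A's count threshold test, for every pair of pairs
  have hB : (pairs.countP fun p =>
        PySem.Set.contains (PySem.Set.ofList (id_list.filter fun v => cntD.getD v 0 ≥ k)) p.2
          && p.1 == u)
      = pairs.countP (fun p => decide (cntD.getD p.2 0 ≥ k) && p.1 == u) := by
    apply List.countP_congr
    intro p hp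
    have h2 : PySem.Set.contains (PySem.Set.ofList (id_list.filter fun v => cntD.getD v 0 ≥ k)) p.2
        = decide (cntD.getD p.2 0 ≥ k) := by
      by_cases hk : cntD.getD p.2 0 ≥ k
      · simp [PySem.Set.contains, PySem.Set.mem_ofList, hk, hmem p hp]
      · simp [PySem.Set.contains, PySem.Set.mem_ofList, hk]
    rw [h2]
  rw [hB]
  have hALB : List.countP (fun p => decide (cntD.getD p.2 0 ≥ k) && p.1 == u) pairs
      = L.countP (fun t => decide (cntD.getD t 0 ≥ k)) := by
    rw [hL]
    conv_rhs => rw [List.countP_map, List.countP_filter]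
    rfl
  by_cases hLnil : L = []
  · rw [if_pos hLnil, hALB, hLnil]
    rfl
  · rw [if_neg hLnil, hALB]
    simpa [ge_iff_le] using PySem.List.foldl_count_if (p := fun t => decide (k ≤ cntD.getD t 0)) L 0
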